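-- pv_equiv track=rewrite | github.com/DieselMikeK/ProductProspector | app/dev/desktop_app.py | _vendor_mapping_priority_order
-- ===== SOURCE A (Python) =====
-- def _vendor_mapping_priority_order(preferred_field: str | None = None) -> list[str]:
--     base_order = [
--         "sku",
--         "title",
--         "description",
--         "price",
--         "cost",
--         "fitment",
--         "media",
--         "vendor",
--         "core_charge",
--         "barcode",
--         "weight",
--     ]
--     if not preferred_field or preferred_field not in base_order:
--         return base_order
--     if preferred_field == "sku":
--         return base_order
--     return ["sku", preferred_field, *[field for field in base_order if field not in {"sku", preferred_field}]]
-- ===== SOURCE B (Python) =====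
-- def _vendor_mapping_priority_order(preferred_field: str | None = None) -> list[str]:
--     base_order = [
--         "sku",
--         "title",
--         "description",
--         "price",
--         "cost",
--         "fitment",
--         "media",
--         "vendor",
--         "core_charge",
--         "barcode",
--         "weight",
--     ]
--     pref = preferred_field if preferred_field and preferred_field in base_order else None
--     return sorted(base_order, key=lambda f: 0 if f == "sku" else (1 if f == pref else 2))
-- ===== Notes on version B (the rewrite author's own statement) =====
-- stated objective: simpler
-- what changed: Replaced the early-return branches plus list/comprehension reconstruction with a single stable sort keyed 0 for 'sku', 1 for the (validated) preferred field, 2 otherwise; stability reproduces all pass-through cases.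
import Mathlib
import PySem

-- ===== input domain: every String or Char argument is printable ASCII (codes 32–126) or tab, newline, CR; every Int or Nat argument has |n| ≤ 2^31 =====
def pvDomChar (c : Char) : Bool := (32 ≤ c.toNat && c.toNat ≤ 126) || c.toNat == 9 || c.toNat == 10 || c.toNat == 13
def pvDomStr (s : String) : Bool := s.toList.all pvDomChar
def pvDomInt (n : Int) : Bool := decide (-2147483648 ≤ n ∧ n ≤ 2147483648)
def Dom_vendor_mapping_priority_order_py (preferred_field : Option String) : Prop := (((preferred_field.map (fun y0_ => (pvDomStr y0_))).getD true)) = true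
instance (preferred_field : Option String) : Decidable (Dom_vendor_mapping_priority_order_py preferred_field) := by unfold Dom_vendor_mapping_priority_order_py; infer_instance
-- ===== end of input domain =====

-- ===== PORT A =====
def pvBaseOrder : List String :=
  ["sku", "title", "description", "price", "cost", "fitment", "media", "vendor",
   "core_charge", "barcode", "weight"]

-- literal port of A: early returns for falsy / absent / "sku" preferred field,
-- else ["sku", preferred, *comprehension filtering those two out]
def vendor_mapping_priority_order_py (preferred_field : Option String) : List String :=
  match preferred_field with
  | none => pvBaseOrder
  | some p =>
    if p = "" ∨ ¬ p ∈ pvBaseOrder then pvBaseOrder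
    else if p = "sku" then pvBaseOrder
    else ["sku", p] ++ pvBaseOrder.filter (fun field => ¬ (field = "sku" ∨ field = p))

-- ===== PORT B =====
-- port of B: validate the preferred field, then one stable sort by a 3-bucket key
def vendor_mapping_priority_order_py_alt (preferred_field : Option String) : List String :=
  let pref : Option String :=
    match preferred_field with
    | some p => if p ≠ "" ∧ p ∈ pvBaseOrder then some p else none
    | none => none
  PySem.List.sorted pvBaseOrder
    (fun f => if f = "sku" then (0 : Int) else if some f = pref then 1 else 2) false

-- ===== PRECONDITION & SPEC =====
def Spec_vendor_mapping_priority_order_py (preferred_field : Option String) (out : List String) : Prop := out = vendor_mapping_priority_order_py_alt preferred_field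
instance (preferred_field : Option String) (out : List String) : Decidable (Spec_vendor_mapping_priority_order_py preferred_field out) := by unfold Spec_vendor_mapping_priority_order_py; infer_instance

-- ===== CLAIM (what is proved, stated in full; the proofs are below) =====
def Claim_equal_vendor_mapping_priority_order_py : Prop := ∀ (preferred_field : Option String), Dom_vendor_mapping_priority_order_py preferred_field → Spec_vendor_mapping_priority_order_py preferred_field (vendor_mapping_priority_order_py preferred_field)

-- ===== LEMMAS AND PROOFS =====

-- ===== VERDICT (by name: the statement is the Claim_ definition above) =====
theorem vendor_mapping_priority_order_py_spec : Claim_equal_vendor_mapping_priority_order_py := by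
  intro pf _
  unfold Spec_vendor_mapping_priority_order_py
  match pf with
  | none => decide
  | some p =>
    by_cases hmem : p ∈ pvBaseOrder
    · simp only [pvBaseOrder, List.mem_cons, List.not_mem_nil, or_false] at hmem
      rcases hmem with h|h|h|h|h|h|h|h|h|h|h <;> subst h <;> decide
    · have h1 : (p = "" ∨ ¬ p ∈ pvBaseOrder) := Or.inr hmem
      have h2 : ¬ (p ≠ "" ∧ p ∈ pvBaseOrder) := fun h => hmem h.2
      simp only [vendor_mapping_priority_order_py, vendor_mapping_priority_order_py_alt,
        if_pos h1, if_neg h2]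
      decide
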